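-- pv_equiv track=rewrite | github.com/Kruti-ka/FactoryGuard-AI | scripts/model_validation.py | categorize_features
-- ===== SOURCE A (Python) =====
-- def categorize_features(feature_names):
--     """
--     Categorize features by type for structured analysis
--
--     Args:
--         feature_names: List of feature names
--
--     Returns:
--         categories: Dictionary mapping category to feature list
--     """
--     categories = {
--         "temperature_base": [],
--         "temperature_rolling": [],
--         "temperature_lag": [],
--         "vibration_base": [],
--         "vibration_rolling": [],
--         "vibration_lag": [],
--         "pressure_base": [],
--         "pressure_rolling": [],
--         "pressure_lag": [],
--         "temporal": [],
--         "other": []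
--     }
--
--     for feature in feature_names:
--         feature_lower = feature.lower()
--
--         if "temperature" in feature_lower:
--             if "roll" in feature_lower:
--                 categories["temperature_rolling"].append(feature)
--             elif "lag" in feature_lower:
--                 categories["temperature_lag"].append(feature)
--             else:
--                 categories["temperature_base"].append(feature)
--         elif "vibration" in feature_lower:
--             if "roll" in feature_lower:
--                 categories["vibration_rolling"].append(feature)
--             elif "lag" in feature_lower:
--                 categories["vibration_lag"].append(feature)
--             else:
--                 categories["vibration_base"].append(feature)
--         elif "pressure" in feature_lower:
--             if "roll" in feature_lower:
--                 categories["pressure_rolling"].append(feature)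
--             elif "lag" in feature_lower:
--                 categories["pressure_lag"].append(feature)
--             else:
--                 categories["pressure_base"].append(feature)
--         elif feature_lower in ["hour", "day", "month", "day_of_week"]:
--             categories["temporal"].append(feature)
--         else:
--             categories["other"].append(feature)
--
--     return categories
-- ===== SOURCE B (Python) =====
-- def _classify(feature):
--     """Single label for a feature: sensor_transform, temporal, or other."""
--     fl = feature.lower()
--     for sensor in ("temperature", "vibration", "pressure"):
--         if sensor in fl:
--             return sensor + ("_rolling" if "roll" in fl else "_lag" if "lag" in fl else "_base")
--     return "temporal" if fl in ("hour", "day", "month", "day_of_week") else "other"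
--
-- def categorize_features(feature_names):
--     """Staged: label every feature once, then build each bucket by filtering on the label."""
--     keys = ["temperature_base", "temperature_rolling", "temperature_lag",
--             "vibration_base", "vibration_rolling", "vibration_lag",
--             "pressure_base", "pressure_rolling", "pressure_lag",
--             "temporal", "other"]
--     labels = [_classify(f) for f in feature_names]
--     return {k: [f for f, lab in zip(feature_names, labels) if lab == k] for k in keys}
-- ===== Notes on version B (the rewrite author's own statement) =====
-- stated objective: alternative
-- what changed: Replaces A's single accumulating pass with nine hard-coded append branches by a staged pipeline: one pass computes a label per feature via a classifier, then each of the 11 buckets is built by its own filter over the labelled features.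
import Mathlib
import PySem

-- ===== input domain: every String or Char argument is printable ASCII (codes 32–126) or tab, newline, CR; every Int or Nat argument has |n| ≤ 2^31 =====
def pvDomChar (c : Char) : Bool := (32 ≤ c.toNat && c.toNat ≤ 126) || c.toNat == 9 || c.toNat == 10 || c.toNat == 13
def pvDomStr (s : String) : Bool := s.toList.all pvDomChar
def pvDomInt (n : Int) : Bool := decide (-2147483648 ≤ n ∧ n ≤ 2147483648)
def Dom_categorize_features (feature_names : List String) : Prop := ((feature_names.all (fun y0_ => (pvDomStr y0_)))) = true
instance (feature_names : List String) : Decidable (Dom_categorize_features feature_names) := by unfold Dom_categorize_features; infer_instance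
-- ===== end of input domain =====

-- B replaces A's single accumulating pass (nine hard-coded append branches) by a staged
-- pipeline: label every feature once, then build each bucket by filtering on its label.

-- ===== PORT A =====
def caInit : PySem.Dict String (List String) :=
  PySem.Dict.ofList
    [("temperature_base", []), ("temperature_rolling", []), ("temperature_lag", []),
     ("vibration_base", []), ("vibration_rolling", []), ("vibration_lag", []),
     ("pressure_base", []), ("pressure_rolling", []), ("pressure_lag", []),
     ("temporal", []), ("other", [])]

def caStep (categories : PySem.Dict String (List String)) (feature : String) :
    PySem.Dict String (List String) :=
  let feature_lower := PySem.Str.lower feature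
  if PySem.Str.isIn "temperature" feature_lower then
    if PySem.Str.isIn "roll" feature_lower then
      categories.modify "temperature_rolling" [] (· ++ [feature])
    else if PySem.Str.isIn "lag" feature_lower then
      categories.modify "temperature_lag" [] (· ++ [feature])
    else
      categories.modify "temperature_base" [] (· ++ [feature])
  else if PySem.Str.isIn "vibration" feature_lower then
    if PySem.Str.isIn "roll" feature_lower then
      categories.modify "vibration_rolling" [] (· ++ [feature])
    else if PySem.Str.isIn "lag" feature_lower then
      categories.modify "vibration_lag" [] (· ++ [feature])
    else
      categories.modify "vibration_base" [] (· ++ [feature])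
  else if PySem.Str.isIn "pressure" feature_lower then
    if PySem.Str.isIn "roll" feature_lower then
      categories.modify "pressure_rolling" [] (· ++ [feature])
    else if PySem.Str.isIn "lag" feature_lower then
      categories.modify "pressure_lag" [] (· ++ [feature])
    else
      categories.modify "pressure_base" [] (· ++ [feature])
  else if ["hour", "day", "month", "day_of_week"].contains feature_lower then
    categories.modify "temporal" [] (· ++ [feature])
  else
    categories.modify "other" [] (· ++ [feature])

def categorize_features (feature_names : List String) : List (String × List String) :=
  (feature_names.foldl caStep caInit).items

-- ===== PORT B =====
-- port of Source B's _classify (the for-loop with early return becomes find?)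
def cbClassify (feature : String) : String :=
  let fl := PySem.Str.lower feature
  match ["temperature", "vibration", "pressure"].find? (fun s => PySem.Str.isIn s fl) with
  | some sensor =>
      sensor ++ (if PySem.Str.isIn "roll" fl then "_rolling"
                 else if PySem.Str.isIn "lag" fl then "_lag" else "_base")
  | none =>
      if ["hour", "day", "month", "day_of_week"].contains fl then "temporal" else "other"

def cbKeys : List String :=
  ["temperature_base", "temperature_rolling", "temperature_lag",
   "vibration_base", "vibration_rolling", "vibration_lag",
   "pressure_base", "pressure_rolling", "pressure_lag",
   "temporal", "other"]

def categorize_features_alt (feature_names : List String) : List (String × List String) :=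
  let labels := feature_names.map cbClassify
  cbKeys.map (fun k => (k, ((feature_names.zip labels).filter (fun p => p.2 == k)).map Prod.fst))

-- ===== PRECONDITION & SPEC =====
def Spec_categorize_features (feature_names : List String) (out : List (String × List String)) : Prop := out = categorize_features_alt feature_names
instance (feature_names : List String) (out : List (String × List String)) : Decidable (Spec_categorize_features feature_names out) := by unfold Spec_categorize_features; infer_instance

-- ===== CLAIM (what is proved, stated in full; the proofs are below) =====
def Claim_equal_categorize_features : Prop := ∀ (feature_names : List String), Dom_categorize_features feature_names → Spec_categorize_features feature_names (categorize_features feature_names)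

-- ===== LEMMAS AND PROOFS =====

-- A's step is: append the feature to the bucket named by its label.
lemma stepA (d : PySem.Dict String (List String)) (f : String) :
    caStep d f = d.modify (cbClassify f) [] (· ++ [f]) := by
  unfold caStep cbClassify
  cases ht : PySem.Str.isIn "temperature" (PySem.Str.lower f) <;>
  cases hv : PySem.Str.isIn "vibration" (PySem.Str.lower f) <;>
  cases hp : PySem.Str.isIn "pressure" (PySem.Str.lower f) <;>
  cases hr : PySem.Str.isIn "roll" (PySem.Str.lower f) <;>
  cases hl : PySem.Str.isIn "lag" (PySem.Str.lower f) <;>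
  simp only [List.find?, ht, hv, hp, hr, hl, Bool.false_eq_true, if_true, if_false] <;>
    first | rfl | (split <;> rfl)

lemma classify_mem (f : String) : cbClassify f ∈ cbKeys := by
  unfold cbClassify cbKeys
  cases ht : PySem.Str.isIn "temperature" (PySem.Str.lower f) <;>
  cases hv : PySem.Str.isIn "vibration" (PySem.Str.lower f) <;>
  cases hp : PySem.Str.isIn "pressure" (PySem.Str.lower f) <;>
  cases hr : PySem.Str.isIn "roll" (PySem.Str.lower f) <;>
  cases hl : PySem.Str.isIn "lag" (PySem.Str.lower f) <;>
  simp only [List.find?, ht, hv, hp, hr, hl, Bool.false_eq_true, if_true, if_false] <;>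
    first | decide | (split <;> decide)

-- every dict with Nodup keys is its keys paired with their values
lemma items_eq_keys_map (d : PySem.Dict String (List String)) (h : d.keys.Nodup) :
    d.items = d.keys.map (fun k => (k, d.getD k [])) := by
  have : d.keys.map (fun k => (k, d.getD k [])) =
      d.items.map (fun p => (p.1, d.getD p.1 [])) := by
    simp only [PySem.Dict.keys, List.map_map]; rfl
  rw [this]
  conv_lhs => rw [show d.items = d.items.map id from (List.map_id _).symm]
  apply List.map_congr_left
  intro p hp
  have := PySem.Dict.getD_of_mem_items (d := d) (k := p.1) (v := p.2) (by simpa using hp) h (d0 := [])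
  simp [this]

lemma fold_keys (l : List String) :
    (l.foldl (fun d f => d.modify (cbClassify f) [] (· ++ [f])) caInit).keys = cbKeys := by
  rw [PySem.Dict.keys_foldl_modify_key]
  have hk : caInit.keys = cbKeys := by decide
  rw [hk, PySem.Set.update_eq_append_filter]
  have : (PySem.Set.ofList (l.map cbClassify)).filter
      (fun y => !(PySem.Set.contains cbKeys y)) = [] := by
    apply List.filter_eq_nil_iff.mpr
    intro y hy
    have hy' : y ∈ l.map cbClassify := by simpa using hy
    obtain ⟨f, _, rfl⟩ := List.mem_map.mp hy'
    simp [PySem.Set.contains, classify_mem f]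
  rw [this, List.append_nil]

lemma fold_nodup (l : List String) :
    (l.foldl (fun d f => d.modify (cbClassify f) [] (· ++ [f])) caInit).keys.Nodup := by
  apply PySem.Dict.nodup_keys_foldl_modify_key
  decide

lemma fold_getD (l : List String) (c : String) :
    (l.foldl (fun d f => d.modify (cbClassify f) [] (· ++ [f])) caInit).getD c [] =
      caInit.getD c [] ++ l.filter (fun f => cbClassify f == c) := by
  have h : l.foldl (fun d f => d.modify (cbClassify f) [] (· ++ [f])) caInit =
      (l.map (fun f => (cbClassify f, f))).foldl
        (fun d p => d.modify p.1 [] (· ++ [p.2])) caInit := by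
    rw [List.foldl_map]
  rw [h, PySem.Dict.getD_foldl_modify_append]
  congr 1
  rw [List.filter_map]
  simp [List.map_map, Function.comp_def]

lemma zip_filter (l : List String) (k : String) :
    ((l.zip (l.map cbClassify)).filter (fun p => p.2 == k)).map Prod.fst =
      l.filter (fun f => cbClassify f == k) := by
  induction l with
  | nil => rfl
  | cons a t ih =>
      simp only [List.map_cons, List.zip_cons_cons, List.filter_cons]
      by_cases h : cbClassify a == k
      · simp [h, ih]
      · simp [h, ih]

-- ===== VERDICT (by name: the statement is the Claim_ definition above) =====
theorem categorize_features_spec : Claim_equal_categorize_features := by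
  intro l _
  unfold Spec_categorize_features categorize_features categorize_features_alt
  have hstep : l.foldl caStep caInit =
      l.foldl (fun d f => d.modify (cbClassify f) [] (· ++ [f])) caInit := by
    congr 1
    funext d f
    exact stepA d f
  rw [hstep, items_eq_keys_map _ (fold_nodup l), fold_keys l]
  apply List.map_congr_left
  intro k hk
  rw [fold_getD l k, zip_filter l k]
  have : caInit.getD k [] = [] := by
    revert hk; unfold cbKeys; intro hk
    fin_cases hk <;> decide
  simp [this]
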